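-- pv_equiv track=rewrite | github.com/ZXHSunSalt/Individuals | func.py | _flags
-- ===== SOURCE A (Python) =====
-- def _flags(flags):
--     ture_count = 0
--     false_count = 0
--     for i in range(len(flags)):
--         if flags[i] == 'True':
--             ture_count += 1
--         else:
--             false_count += 1
--     return ture_count, false_count
-- ===== SOURCE B (Python) =====
-- def _flags(flags):
--     def go(lo, hi):
--         if hi - lo <= 0:
--             return 0, 0
--         if hi - lo == 1:
--             return (1, 0) if flags[lo] == 'True' else (0, 1)
--         mid = (lo + hi) // 2
--         l = go(lo, mid)
--         r = go(mid, hi)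
--         return l[0] + r[0], l[1] + r[1]
--     return go(0, len(flags))
-- ===== Notes on version B (the rewrite author's own statement) =====
-- stated objective: alternative
-- what changed: Replaces the left-to-right two-accumulator index loop with a recursive divide-and-conquer: split the index range at the midpoint, count each half, and add the pair results.
import Mathlib
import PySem

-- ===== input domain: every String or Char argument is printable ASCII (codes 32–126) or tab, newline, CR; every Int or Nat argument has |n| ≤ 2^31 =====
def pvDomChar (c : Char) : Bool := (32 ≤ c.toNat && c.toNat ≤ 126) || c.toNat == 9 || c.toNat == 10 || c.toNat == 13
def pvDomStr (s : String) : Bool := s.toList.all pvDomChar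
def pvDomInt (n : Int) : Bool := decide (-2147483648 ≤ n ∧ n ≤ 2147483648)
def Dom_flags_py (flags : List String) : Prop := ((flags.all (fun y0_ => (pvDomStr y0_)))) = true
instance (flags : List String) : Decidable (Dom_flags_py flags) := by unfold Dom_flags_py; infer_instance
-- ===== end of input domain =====

-- B replaces A's left-to-right two-accumulator index loop with a recursive divide-and-conquer
-- over the index range, adding the pair counts of the two halves (objective: alternative).
-- ===== PORT A =====
def flags_py (flags : List String) : Int × Int :=
  (PySem.List.pyRange 0 flags.length 1).foldl
    (fun (acc : Int × Int) i =>
      if PySem.List.pyGetD flags i "" == "True" then (acc.1 + 1, acc.2)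
      else (acc.1, acc.2 + 1)) (0, 0)

-- ===== PORT B =====
-- inner helper go(lo, hi) of Source B
def flagsGo (flags : List String) (lo hi : Int) : Int × Int :=
  if hle : hi - lo ≤ 0 then (0, 0)
  else if hi - lo = 1 then
    (if PySem.List.pyGetD flags lo "" == "True" then (1, 0) else (0, 1))
  else
    let mid := PySem.Int.floordiv (lo + hi) 2
    let l := flagsGo flags lo mid
    let r := flagsGo flags mid hi
    (l.1 + r.1, l.2 + r.2)
termination_by (hi - lo).toNat
decreasing_by
  all_goals simp [PySem.Int.floordiv, Int.fdiv_eq_ediv]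
  all_goals omega

def flags_py_alt (flags : List String) : Int × Int :=
  flagsGo flags 0 flags.length

-- ===== PRECONDITION & SPEC =====
def Spec_flags_py (flags : List String) (out : Int × Int) : Prop := out = flags_py_alt flags
instance (flags : List String) (out : Int × Int) : Decidable (Spec_flags_py flags out) := by unfold Spec_flags_py; infer_instance

-- ===== CLAIM (what is proved, stated in full; the proofs are below) =====
def Claim_equal_flags_py : Prop := ∀ (flags : List String), Dom_flags_py flags → Spec_flags_py flags (flags_py flags)

-- ===== LEMMAS AND PROOFS =====
-- A's loop step starting from (t, f) just shifts the result of starting from (0, 0).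
theorem fold_shift (flags : List String) (xs : List Int) (t f : Int) :
    xs.foldl (fun (acc : Int × Int) i =>
        if PySem.List.pyGetD flags i "" == "True" then (acc.1 + 1, acc.2)
        else (acc.1, acc.2 + 1)) (t, f)
      = (t + (xs.foldl (fun (acc : Int × Int) i =>
          if PySem.List.pyGetD flags i "" == "True" then (acc.1 + 1, acc.2)
          else (acc.1, acc.2 + 1)) (0, 0)).1,
         f + (xs.foldl (fun (acc : Int × Int) i =>
          if PySem.List.pyGetD flags i "" == "True" then (acc.1 + 1, acc.2)
          else (acc.1, acc.2 + 1)) (0, 0)).2) := by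
  induction xs generalizing t f with
  | nil => simp
  | cons x xs ih =>
    simp only [List.foldl_cons]
    split_ifs with hx
    · rw [ih (t + 1) f, ih (0 + 1) 0]
      refine Prod.ext ?_ ?_ <;> simp <;> ring
    · rw [ih t (f + 1), ih 0 (0 + 1)]
      refine Prod.ext ?_ ?_ <;> simp <;> ring

-- B's divide-and-conquer equals A's loop over the same index range.
theorem go_eq_fold (flags : List String) (lo hi : Int) :
    flagsGo flags lo hi
      = (PySem.List.pyRange lo hi 1).foldl
          (fun (acc : Int × Int) i =>
            if PySem.List.pyGetD flags i "" == "True" then (acc.1 + 1, acc.2)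
            else (acc.1, acc.2 + 1)) (0, 0) := by
  generalize hn : (hi - lo).toNat = n
  induction n using Nat.strong_induction_on generalizing lo hi with
  | _ n ih =>
    rw [flagsGo]
    by_cases hle : hi - lo ≤ 0
    · rw [dif_pos hle, PySem.List.pyRange_one_eq_nil (by omega)]; simp
    · rw [dif_neg hle]
      by_cases h1 : hi - lo = 1
      · rw [if_pos h1,
          show hi = lo + 1 by omega, PySem.List.pyRange_one_singleton]
        simp only [List.foldl_cons, List.foldl_nil]
        by_cases hx : PySem.List.pyGetD flags lo "" == "True" <;> simp [hx]
      · rw [if_neg h1]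
        have hfd : PySem.Int.floordiv (lo + hi) 2 = (lo + hi) / 2 := by
          simp [PySem.Int.floordiv, Int.fdiv_eq_ediv]
        simp only [hfd]
        have hb : lo < (lo + hi) / 2 ∧ (lo + hi) / 2 < hi := by omega
        have hb2 : ((lo + hi) / 2 - lo).toNat < n := by omega
        have hb3 : (hi - (lo + hi) / 2).toNat < n := by omega
        have h1' := ih _ hb2 lo ((lo + hi) / 2) rfl
        have h2' := ih _ hb3 ((lo + hi) / 2) hi rfl
        rw [PySem.List.pyRange_one_append lo ((lo + hi) / 2) hi (le_of_lt hb.1) (le_of_lt hb.2),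
          List.foldl_append, ← h1']
        rcases hA : flagsGo flags lo ((lo + hi) / 2) with ⟨t1, f1⟩
        rcases hB : flagsGo flags ((lo + hi) / 2) hi with ⟨t2, f2⟩
        simp only [hA, hB]
        rw [fold_shift flags (PySem.List.pyRange ((lo + hi) / 2) hi 1) t1 f1, ← h2', hB]

-- ===== VERDICT (by name: the statement is the Claim_ definition above) =====
theorem flags_py_spec : Claim_equal_flags_py := by
  intro flags _
  unfold Spec_flags_py flags_py flags_py_alt
  rw [go_eq_fold]
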